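-- pv_equiv track=rewrite | github.com/cirosantilli/project-euler-solvers | solvers/70.py | digit_signature
-- ===== SOURCE A (Python) =====
-- _SHIFT = [1 << (3 * d) for d in range(10)]
--
-- def digit_signature(x: int) -> int:
--     """
--     Packed digit counts in base 8 per digit (3 bits each).
--     For numbers < 10^7, each digit count <= 7, so 3 bits is enough.
--     """
--     if x == 0:
--         return _SHIFT[0]
--     s = 0
--     sh = _SHIFT
--     while x:
--         s += sh[x % 10]
--         x //= 10
--     return s
-- ===== SOURCE B (Python) =====
-- _SHIFT = [1 << (3 * d) for d in range(10)]
--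
-- def digit_signature(x: int) -> int:
--     """Tabulate decimal-digit frequencies from str(x), then sum shift*count."""
--     counts = {}
--     for d in str(x):
--         counts[d] = counts.get(d, 0) + 1
--     return sum(_SHIFT[int(d)] * n for d, n in counts.items())
-- ===== Notes on version B (the rewrite author's own statement) =====
-- stated objective: alternative
-- what changed: B converts x to its decimal string, tabulates digit frequencies in a dict in one pass, and returns the sum of _SHIFT[digit]*count over the distinct digits, instead of A's arithmetic modulus/floor-division extraction loop with a per-step accumulator and a zero special case.
import Mathlib
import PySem

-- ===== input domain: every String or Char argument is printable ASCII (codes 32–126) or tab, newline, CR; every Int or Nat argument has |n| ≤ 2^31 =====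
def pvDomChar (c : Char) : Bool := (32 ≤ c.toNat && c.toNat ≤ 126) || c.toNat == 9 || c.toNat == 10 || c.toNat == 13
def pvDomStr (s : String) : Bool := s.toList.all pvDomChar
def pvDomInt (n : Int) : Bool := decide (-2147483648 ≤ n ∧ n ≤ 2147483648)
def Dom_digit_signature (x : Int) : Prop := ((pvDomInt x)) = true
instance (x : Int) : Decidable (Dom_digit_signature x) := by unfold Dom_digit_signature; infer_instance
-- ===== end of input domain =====

-- B tabulates digit frequencies from the decimal string and sums shift*count over
-- distinct digits, replacing A's %10//10 extraction loop (objective: alternative).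


-- ===== PORT A =====
-- _SHIFT = [1 << (3 * d) for d in range(10)]
def pvShift : List Int := (List.range 10).map (fun d => (1 : Int) <<< (3 * d))

-- the while loop of A, on x.toNat: exact for x ≥ 0 (= Pre_); for negative x the Python loop never terminates.
def pvLoopA (x : Nat) (s : Int) : Int :=
  if x = 0 then s
  else pvLoopA (x / 10) (s + PySem.List.pyGetD pvShift ((x % 10 : Nat) : Int) 0)
  termination_by x
  decreasing_by exact Nat.div_lt_self (Nat.pos_of_ne_zero (by assumption)) (by omega)

def digit_signature (x : Int) : Int :=
  if x = 0 then PySem.List.pyGetD pvShift 0 0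
  else pvLoopA x.toNat 0

-- ===== PORT B =====
def digit_signature_alt (x : Int) : Int :=
  let counts := (PySem.Int.toChars x).foldl
    (fun d c => d.insert c (d.getD c 0 + 1)) PySem.Dict.empty
  -- int(d): (ofChars? [c]).getD 0 — exact here, every char of str(x) for x ≥ 0 is a decimal digit
  (counts.items.map
    (fun p => PySem.List.pyGetD pvShift ((PySem.Int.ofChars? [p.1]).getD 0) 0 * p.2)).sum

-- ===== PRECONDITION & SPEC =====
-- Pre_ excludes negative x, on which A's while loop never terminates (floor division never reaches the loop exit).
def Pre_digit_signature (x : Int) : Prop := 0 ≤ x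
instance (x : Int) : Decidable (Pre_digit_signature x) := by unfold Pre_digit_signature; infer_instance
def pvWitness_digit_signature : Int := (1234)

def Spec_digit_signature (x : Int) (out : Int) : Prop := out = digit_signature_alt x
instance (x : Int) (out : Int) : Decidable (Spec_digit_signature x out) := by unfold Spec_digit_signature; infer_instance

-- ===== CLAIM (what is proved, stated in full; the proofs are below) =====
def Claim_equal_digit_signature : Prop := ∀ (x : Int), Dom_digit_signature x → Pre_digit_signature x → Spec_digit_signature x (digit_signature x)

-- ===== LEMMAS AND PROOFS =====
-- pvF c = _SHIFT[int(c)] : the per-character summand of B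
def pvF (c : Char) : Int :=
  PySem.List.pyGetD pvShift ((PySem.Int.ofChars? [c]).getD 0) 0

theorem pvF_digitChar (d : Nat) (h : d < 10) :
    pvF (Nat.digitChar d) = PySem.List.pyGetD pvShift (d : Int) 0 := by
  interval_cases d <;> decide

theorem pvLoopA_acc (n : Nat) : ∀ s : Int, pvLoopA n s = s + pvLoopA n 0 := by
  induction n using Nat.strong_induction_on with
  | _ n ih =>
    intro s
    by_cases h : n = 0
    · simp [pvLoopA, h]
    · conv_lhs => rw [pvLoopA]
      conv_rhs => rw [pvLoopA]
      simp only [h, if_false]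
      have hlt : n / 10 < n := Nat.div_lt_self (Nat.pos_of_ne_zero h) (by omega)
      rw [ih (n / 10) hlt, ih (n / 10) hlt (0 + _)]
      ring

-- one unfolding step of A's loop, accumulator pulled out
theorem pvLoopA_step (m : Nat) (hm : m ≠ 0) :
    pvLoopA m 0 = PySem.List.pyGetD pvShift ((m % 10 : Nat) : Int) 0 + pvLoopA (m / 10) 0 := by
  conv_lhs => rw [pvLoopA]
  simp only [hm, if_false]
  rw [pvLoopA_acc (m / 10)]
  ring

theorem toDigitsCore_sum (fuel : Nat) : ∀ (n : Nat) (ds : List Char), n < fuel →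
    ((Nat.toDigitsCore 10 fuel n ds).map pvF).sum
      = pvF (Nat.digitChar (n % 10)) + pvLoopA (n / 10) 0 + ((ds.map pvF).sum) := by
  induction fuel with
  | zero => intro n ds h; omega
  | succ f ih =>
    intro n ds h
    rw [Nat.toDigitsCore]
    by_cases h2 : n / 10 = 0
    · simp [h2, pvLoopA]
    · simp only [h2, if_false]
      rw [ih (n / 10) _ (by omega)]
      rw [pvLoopA_step (n / 10) h2]
      rw [pvF_digitChar (n / 10 % 10) (Nat.mod_lt _ (by omega))]
      simp only [List.map_cons, List.sum_cons]
      ring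

theorem sum_counts (l : List Char) :
    ((PySem.Set.ofList l).map (fun k => pvF k * (l.count k : Int))).sum
      = (l.map pvF).sum := by
  have hnd : (PySem.Set.ofList l).Nodup := PySem.Set.nodup_ofList l
  have hfin : (PySem.Set.ofList l).toFinset = l.toFinset := by
    ext c; simp [PySem.Set.mem_ofList]
  calc ((PySem.Set.ofList l).map (fun k => pvF k * (l.count k : Int))).sum
      = ∑ m ∈ (PySem.Set.ofList l).toFinset, pvF m * (l.count m : Int) :=
        (List.sum_toFinset _ hnd).symm
    _ = ∑ m ∈ l.toFinset, l.count m • pvF m := by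
        rw [hfin]; exact Finset.sum_congr rfl (fun m _ => by
          rw [nsmul_eq_mul, mul_comm])
    _ = (l.map pvF).sum := (Finset.sum_list_map_count l pvF).symm

theorem alt_eq_sum (x : Int) (hx : 0 ≤ x) :
    digit_signature_alt x = ((Nat.toDigits 10 x.toNat).map pvF).sum := by
  have hchars : PySem.Int.toChars x = Nat.toDigits 10 x.toNat := by
    unfold PySem.Int.toChars
    simp [not_lt.mpr hx]
  simp only [digit_signature_alt, PySem.Dict.foldl_insert_getD_add_one_eq_counter,
    PySem.Dict.items_counter, hchars, List.map_map]
  exact sum_counts (Nat.toDigits 10 x.toNat)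

-- ===== VERDICT (by name: the statement is the Claim_ definition above) =====
theorem digit_signature_spec : Claim_equal_digit_signature := by
  intro x _ hpre
  have hx0 : (0 : Int) ≤ x := hpre
  unfold Spec_digit_signature
  rw [alt_eq_sum x hx0]
  by_cases hx : x = 0
  · subst hx; decide
  · have hn : x.toNat ≠ 0 := by omega
    unfold Nat.toDigits
    rw [toDigitsCore_sum (x.toNat + 1) x.toNat [] (by omega)]
    unfold digit_signature
    simp only [hx, if_false, List.map_nil, List.sum_nil, add_zero]
    rw [pvLoopA_step x.toNat hn]
    rw [pvF_digitChar (x.toNat % 10) (Nat.mod_lt _ (by omega))]
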